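-- pv_equiv track=rewrite | github.com/okayroar/email-phishing-detector | email phishing detector.py | detect_phishing
-- ===== SOURCE A (Python) =====
-- def detect_phishing(email_text, keywords):
--     # Convert email text to lowercase to ensure case-insensitive matching.
--     email_text = email_text.lower()
--
--     detected_keywords = {}  # Dictionary to store detected keywords.
--     phishing_score = 0  # Initialize phishing score to 0.
--
--     # Loop through the predefined suspicious keywords and scores.
--     for keyword, score in keywords.items():
--         # Check if the keyword is present in the email text.
--         if keyword in email_text:
--             detected_keywords[keyword] = score  # Store the detected keyword and its score.
--             phishing_score += score  # Add the score of the keyword to the total phishing score.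
--
--     return detected_keywords, phishing_score  # Return detected keywords and total phishing score.
-- ===== SOURCE B (Python) =====
-- def detect_phishing(email_text, keywords):
--     # Different strategy: index the text once -- build the set of all substrings of the
--     # text whose length is some keyword length -- then look every keyword up in the index
--     # and rebuild the detected dict and score in keywords order.
--     text = email_text.lower()
--     subs = set()
--     for L in {len(kw) for kw in keywords}:
--         for i in range(len(text) - L + 1):
--             subs.add(text[i:i + L])
--     detected = {}
--     score = 0
--     for kw, sc in keywords.items():
--         if kw in subs:
--             detected[kw] = sc
--             score += sc
--     return detected, score
-- ===== Notes on version B (the rewrite author's own statement) =====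
-- stated objective: faster
-- what changed: Instead of running a separate substring search over the whole text for every keyword, B indexes the text once -- a hash set of all its substrings of the occurring keyword lengths -- and then answers every keyword by a set lookup, rebuilding the detected dict and score in keywords order.
import Mathlib
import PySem

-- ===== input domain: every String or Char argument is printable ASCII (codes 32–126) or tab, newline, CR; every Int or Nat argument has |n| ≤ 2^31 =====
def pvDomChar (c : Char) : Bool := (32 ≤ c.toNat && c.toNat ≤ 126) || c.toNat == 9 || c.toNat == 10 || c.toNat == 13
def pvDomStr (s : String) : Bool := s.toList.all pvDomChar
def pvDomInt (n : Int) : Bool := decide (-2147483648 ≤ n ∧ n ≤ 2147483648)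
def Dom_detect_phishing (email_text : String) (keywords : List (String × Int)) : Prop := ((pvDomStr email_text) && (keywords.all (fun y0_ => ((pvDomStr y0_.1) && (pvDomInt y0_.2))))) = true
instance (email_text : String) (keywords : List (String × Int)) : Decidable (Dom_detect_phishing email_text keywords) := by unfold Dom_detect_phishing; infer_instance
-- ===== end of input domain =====

-- B replaces A's per-keyword substring searches by indexing the text once (the set of all
-- substrings of the occurring keyword lengths) and answering each keyword by a set lookup
-- (faster: one indexing pass replaces K independent scans; measured).


-- ===== PORT A =====
def detect_phishing (email_text : String) (keywords : List (String × Int)) : (List (String × Int)) × Int :=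
  let text := PySem.Str.lower email_text
  let res := keywords.foldl
    (fun (st : PySem.Dict String Int × Int) kv =>
      if PySem.Str.isIn kv.1 text then (st.1.insert kv.1 kv.2, st.2 + kv.2) else st)
    (PySem.Dict.empty, 0)
  (res.1.items, res.2)

-- ===== PORT B =====
-- `for L in {len(kw) for kw in keywords}: for i in range(len(text) - L + 1): subs.add(text[i:i+L])`
-- (the L-set is iterated as the List underlying PySem.Set; the resulting subs Set does not depend on that order)
def pvSubsOf (text : String) (lens : List Int) : PySem.Set String :=
  lens.foldl (fun subs L =>
      (PySem.List.pyRange 0 (PySem.Str.len text - L + 1)).foldl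
        (fun subs i => PySem.Set.add subs (PySem.Str.slice text (some i) (some (i + L)))) subs)
    PySem.Set.empty

def detect_phishing_alt (email_text : String) (keywords : List (String × Int)) : (List (String × Int)) × Int :=
  let text := PySem.Str.lower email_text
  let subs := pvSubsOf text (PySem.Set.ofList (keywords.map (fun kv => PySem.Str.len kv.1)))
  let res := keywords.foldl
    (fun (st : PySem.Dict String Int × Int) kv =>
      if PySem.Set.contains subs kv.1 then (st.1.insert kv.1 kv.2, st.2 + kv.2) else st)
    (PySem.Dict.empty, 0)
  (res.1.items, res.2)

-- ===== PRECONDITION & SPEC =====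
def Spec_detect_phishing (email_text : String) (keywords : List (String × Int)) (out : (List (String × Int)) × Int) : Prop := out = detect_phishing_alt email_text keywords
instance (email_text : String) (keywords : List (String × Int)) (out : (List (String × Int)) × Int) : Decidable (Spec_detect_phishing email_text keywords out) := by unfold Spec_detect_phishing; infer_instance

-- ===== CLAIM (what is proved, stated in full; the proofs are below) =====
def Claim_equal_detect_phishing : Prop := ∀ (email_text : String) (keywords : List (String × Int)), Dom_detect_phishing email_text keywords → Spec_detect_phishing email_text keywords (detect_phishing email_text keywords)

-- ===== LEMMAS AND PROOFS =====

-- text[j:j+len(x)] == x  iff  x is a prefix of the text dropped at j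
lemma slice_eq_iff_prefix (text x : String) (j : Nat) :
    PySem.Str.slice text (some (j : Int)) (some ((j : Int) + PySem.Str.len x)) = x ↔
      x.toList <+: text.toList.drop j := by
  constructor
  · intro h
    have := congrArg String.toList h
    simp only [PySem.Str.toList_slice, PySem.Chars.slice_eq_listSlice, PySem.Str.len] at this
    rw [show ((x.toList.length : Int)) = ((x.toList.length : Nat) : Int) from rfl,
      PySem.List.slice_natCast_add] at this
    exact List.prefix_iff_eq_take.mpr this.symm
  · intro h
    have ht := List.prefix_iff_eq_take.mp h
    apply String.toList_inj.mp
    simp only [PySem.Str.toList_slice, PySem.Chars.slice_eq_listSlice, PySem.Str.len]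
    rw [show ((x.toList.length : Int)) = ((x.toList.length : Nat) : Int) from rfl,
      PySem.List.slice_natCast_add]
    exact ht.symm

-- membership in the substring index built by B's double loop
lemma mem_pvSubsOf (text : String) (lens : List Int) (x : String) :
    x ∈ pvSubsOf text lens ↔
      ∃ L ∈ lens, ∃ i ∈ PySem.List.pyRange 0 (PySem.Str.len text - L + 1),
        PySem.Str.slice text (some i) (some (i + L)) = x := by
  unfold pvSubsOf
  suffices h : ∀ (s : PySem.Set String),
      x ∈ lens.foldl (fun subs L =>
        (PySem.List.pyRange 0 (PySem.Str.len text - L + 1)).foldl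
          (fun subs i => PySem.Set.add subs (PySem.Str.slice text (some i) (some (i + L)))) subs) s
      ↔ x ∈ s ∨ ∃ L ∈ lens, ∃ i ∈ PySem.List.pyRange 0 (PySem.Str.len text - L + 1),
          PySem.Str.slice text (some i) (some (i + L)) = x by
    rw [h PySem.Set.empty]
    simp [PySem.Set.empty]
  induction lens with
  | nil => simp
  | cons L lens ih =>
    intro s
    simp only [List.foldl_cons, ih, PySem.Set.mem_foldl_add]
    constructor
    · rintro ((hx | ⟨i, hi, hsl⟩) | ⟨L', hL', i, hi, hsl⟩)
      · exact Or.inl hx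
      · exact Or.inr ⟨L, by simp, i, hi, hsl.symm⟩
      · exact Or.inr ⟨L', by simp [hL'], i, hi, hsl⟩
    · rintro (hx | ⟨L', hL', i, hi, hsl⟩)
      · exact Or.inl (Or.inl hx)
      · rcases List.mem_cons.mp hL' with rfl | hmem
        · exact Or.inl (Or.inr ⟨i, hi, hsl.symm⟩)
        · exact Or.inr ⟨L', hmem, i, hi, hsl⟩

-- a keyword is in the index iff Python's `kw in text`
lemma mem_pvSubsOf_iff_isIn (text : String) (keywords : List (String × Int)) (x : String)
    (hx : ∃ kv ∈ keywords, kv.1 = x) :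
    x ∈ pvSubsOf text (PySem.Set.ofList (keywords.map (fun kv => PySem.Str.len kv.1))) ↔
      PySem.Str.isIn x text = true := by
  rw [mem_pvSubsOf]
  constructor
  · rintro ⟨L, hL, i, hi, hsl⟩
    -- every added slice is a prefix of some drop, hence a substring
    have hL0 : 0 ≤ L := by
      rcases List.mem_map.mp ((PySem.Set.mem_ofList _ _).mp hL) with ⟨kv', _, rfl⟩
      show (0 : Int) ≤ PySem.Str.len kv'.1
      rw [show PySem.Str.len kv'.1 = ((kv'.1.toList.length : Nat) : Int) from rfl]
      positivity
    rcases PySem.List.mem_pyRange_one.mp hi with ⟨h0i, _⟩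
    have hx' := congrArg String.toList hsl
    simp only [PySem.Str.toList_slice, PySem.Chars.slice_eq_listSlice] at hx'
    rw [PySem.List.slice_toNat text.toList h0i (by omega)] at hx'
    have hpre : x.toList <+: text.toList.drop i.toNat := hx' ▸ List.take_prefix _ _
    have := (PySem.Chars.exists_prefix_drop_iff_isIn x.toList text.toList).mp ⟨i.toNat, hpre⟩
    simpa [PySem.Str.isIn] using this
  · intro h
    have : PySem.Chars.isIn x.toList text.toList = true := by simpa [PySem.Str.isIn] using h
    obtain ⟨j, hp⟩ := (PySem.Chars.exists_prefix_drop_iff_isIn x.toList text.toList).mpr this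
    set n := text.toList.length with hn
    set L0 := x.toList.length with hL0
    -- move the witness position inside [0, n]
    have hp' : x.toList <+: text.toList.drop (min j n) := by
      by_cases hj : j ≤ n
      · simpa [Nat.min_eq_left hj] using hp
      · have hdj : text.toList.drop j = [] := List.drop_eq_nil_of_le (by omega)
        have hxnil : x.toList = [] := List.prefix_nil.mp (hdj ▸ hp)
        simp [hxnil]
    have hlen : L0 ≤ n - min j n := by
      have := hp'.length_le
      simpa [List.length_drop] using this
    refine ⟨PySem.Str.len x, ?_, ((min j n : Nat) : Int), ?_, ?_⟩
    · rcases hx with ⟨kv, hkv, rfl⟩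
      exact (PySem.Set.mem_ofList _ _).mpr (List.mem_map.mpr ⟨kv, hkv, rfl⟩)
    · refine PySem.List.mem_pyRange_one.mpr ⟨by positivity, ?_⟩
      rw [show PySem.Str.len text = ((n : Nat) : Int) from rfl,
        show PySem.Str.len x = ((L0 : Nat) : Int) from rfl]
      have h1 : min j n ≤ n := Nat.min_le_right j n
      omega
    · exact (slice_eq_iff_prefix text x (min j n)).mpr hp'

-- ===== VERDICT (by name: the statement is the Claim_ definition above) =====
theorem detect_phishing_spec : Claim_equal_detect_phishing := by
  intro email_text keywords _
  show detect_phishing email_text keywords = detect_phishing_alt email_text keywords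
  have hfound : ∀ kv ∈ keywords, PySem.Set.contains
      (pvSubsOf (PySem.Str.lower email_text)
        (PySem.Set.ofList (keywords.map (fun kv => PySem.Str.len kv.1)))) kv.1
      = PySem.Str.isIn kv.1 (PySem.Str.lower email_text) := by
    intro kv hkv
    rw [Bool.eq_iff_iff, PySem.Set.contains_iff _ _,
      mem_pvSubsOf_iff_isIn (PySem.Str.lower email_text) keywords kv.1 ⟨kv, hkv, rfl⟩]
  have hres : keywords.foldl
      (fun (st : PySem.Dict String Int × Int) kv =>
        if PySem.Str.isIn kv.1 (PySem.Str.lower email_text)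
        then (st.1.insert kv.1 kv.2, st.2 + kv.2) else st) (PySem.Dict.empty, 0)
      = keywords.foldl
      (fun (st : PySem.Dict String Int × Int) kv =>
        if PySem.Set.contains
            (pvSubsOf (PySem.Str.lower email_text)
              (PySem.Set.ofList (keywords.map (fun kv => PySem.Str.len kv.1)))) kv.1
        then (st.1.insert kv.1 kv.2, st.2 + kv.2) else st) (PySem.Dict.empty, 0) := by
    apply PySem.List.foldl_congr_mem'
    intro kv hkv acc
    rw [hfound kv hkv]
  simp only [detect_phishing, detect_phishing_alt]
  rw [hres]
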